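-- pv_equiv track=rewrite | github.com/platform6/ga_python | class_notes/W5/day-02/solution.py | find_grade_list
-- ===== SOURCE A (Python) =====
-- def find_grade_list(students_list):
--
--
--     # [' Rubble', ' Test_3', '  80', ' Test_4 ', ' 80', ' quiz ', ' 90']
--     # [' Bunny', ' Test_2', ' 100', ' Test_1', ' 100', 'Test_3   ', ' 100 ', 'Test_4 ', ' 100']
--     # [' Duck', ' Test_1', ' 86', ' Test_5   ', ' 100 ', ' Test_2 ', '93 ', 'Test_4', ' 94']
--
--
--
--     test_1 = 0
--     test_2 = 0
--     test_3 = 0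
--     test_4 = 0
--     for index, grades in enumerate(students_list):
--         if grades.strip() == 'Test_1':
--             test_1 = students_list[index + 1]
--         if grades.strip() == 'Test_2':
--             test_2 = students_list[index + 1]
--         if grades.strip() == 'Test_3':
--             test_3 = students_list[index + 1]
--         if grades.strip() == 'Test_4':
--             test_4 = students_list[index + 1]
--
--     return[students_list[0], int(test_1), int(test_2), int(test_3), int(test_4)]
-- ===== SOURCE B (Python) =====
-- def find_grade_list(students_list):
--     def grade(label):
--         for i in reversed(range(len(students_list))):
--             if students_list[i].strip() == label:
--                 return int(students_list[i + 1])
--         return 0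
--     return [students_list[0], grade('Test_1'), grade('Test_2'), grade('Test_3'), grade('Test_4')]
-- ===== Notes on version B (the rewrite author's own statement) =====
-- stated objective: simpler
-- what changed: A keeps four accumulator variables across one forward enumerate pass (last label occurrence wins by overwriting); B instead does, per label, an independent backward scan that returns int(students_list[i+1]) at the first match from the end (or 0), with no mutable state.
import Mathlib
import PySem

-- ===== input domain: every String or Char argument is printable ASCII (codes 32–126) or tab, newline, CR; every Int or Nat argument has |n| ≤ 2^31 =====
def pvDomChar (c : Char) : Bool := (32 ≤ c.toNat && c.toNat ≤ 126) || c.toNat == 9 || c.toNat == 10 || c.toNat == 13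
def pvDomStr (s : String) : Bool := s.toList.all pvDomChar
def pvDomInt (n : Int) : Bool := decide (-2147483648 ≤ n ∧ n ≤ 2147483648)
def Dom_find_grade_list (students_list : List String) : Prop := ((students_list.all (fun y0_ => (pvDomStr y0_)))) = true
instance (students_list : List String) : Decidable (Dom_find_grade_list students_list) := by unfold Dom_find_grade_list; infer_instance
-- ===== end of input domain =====

-- B replaces A's single stateful forward pass (four accumulator variables) by four independent
-- backward searches with early return (last occurrence = first match from the end); objective: simpler.

-- ===== PORT A =====
-- the loop body: four independent ifs, each overwriting its variable with students_list[index+1].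
-- In Python test_i is the int 0 until a label matches and a STRING afterwards; we model that
-- state as Option String (none = the initial 0); int(...) of the final state is pvIntOfA below.
def pvStepA (students_list : List String)
    (s : Option String × Option String × Option String × Option String)
    (p : Int × String) : Option String × Option String × Option String × Option String :=
  let t1 := if PySem.Str.strip p.2 == "Test_1" then some (PySem.List.pyGetD students_list (p.1 + 1) "") else s.1
  let t2 := if PySem.Str.strip p.2 == "Test_2" then some (PySem.List.pyGetD students_list (p.1 + 1) "") else s.2.1
  let t3 := if PySem.Str.strip p.2 == "Test_3" then some (PySem.List.pyGetD students_list (p.1 + 1) "") else s.2.2.1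
  let t4 := if PySem.Str.strip p.2 == "Test_4" then some (PySem.List.pyGetD students_list (p.1 + 1) "") else s.2.2.2
  (t1, t2, t3, t4)

-- int(test_i): int(0) = 0, int(s) = PySem.Int.ofStr? s (Pre_ guarantees it succeeds where reached)
def pvIntOfA : Option String → Int
  | none => 0
  | some s => (PySem.Int.ofStr? s).getD 0

def find_grade_list (students_list : List String) : String × Int × Int × Int × Int :=
  let st := (PySem.List.enumerate students_list).foldl (pvStepA students_list) (none, none, none, none)
  (PySem.List.pyGetD students_list 0 "",
   pvIntOfA st.1, pvIntOfA st.2.1, pvIntOfA st.2.2.1, pvIntOfA st.2.2.2)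

-- ===== PORT B =====
-- grade(label): scan the indices from the end, return int(students_list[i+1]) at the first match, else 0
def pvGradeB (students_list : List String) (label : String) : List Int → Int
  | [] => 0
  | i :: rest =>
    if PySem.Str.strip (PySem.List.pyGetD students_list i "") == label then
      (PySem.Int.ofStr? (PySem.List.pyGetD students_list (i + 1) "")).getD 0
    else pvGradeB students_list label rest

def find_grade_list_alt (students_list : List String) : String × Int × Int × Int × Int :=
  let idxs := (PySem.List.pyRange 0 (PySem.List.len students_list)).reverse
  (PySem.List.pyGetD students_list 0 "",
   pvGradeB students_list "Test_1" idxs,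
   pvGradeB students_list "Test_2" idxs,
   pvGradeB students_list "Test_3" idxs,
   pvGradeB students_list "Test_4" idxs)

-- ===== PRECONDITION & SPEC =====
-- Pre_ excludes exactly the inputs where A raises: the empty list (students_list[0] → IndexError),
-- a label in the last position (students_list[index+1] → IndexError), and a label whose last
-- occurrence is followed by a string int() rejects (ValueError).
def Pre_find_grade_list (students_list : List String) : Prop :=
  students_list ≠ [] ∧
  ∀ i, i < students_list.length →
    PySem.Str.strip (students_list.getD i "") ∈ (["Test_1", "Test_2", "Test_3", "Test_4"] : List String) →
    (i + 1 < students_list.length ∧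
      ((∀ j, j < students_list.length → i < j →
          PySem.Str.strip (students_list.getD j "") ≠ PySem.Str.strip (students_list.getD i "")) →
        (PySem.Int.ofStr? (students_list.getD (i + 1) "")).isSome = true))
instance (students_list : List String) : Decidable (Pre_find_grade_list students_list) := by
  unfold Pre_find_grade_list; infer_instance

def pvWitness_find_grade_list : List String := [" Ann", "Test_1", " 10", " Test_3 ", "7"]

def Spec_find_grade_list (students_list : List String) (out : String × Int × Int × Int × Int) : Prop := out = find_grade_list_alt students_list
instance (students_list : List String) (out : String × Int × Int × Int × Int) : Decidable (Spec_find_grade_list students_list out) := by unfold Spec_find_grade_list; infer_instance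

-- ===== CLAIM (what is proved, stated in full; the proofs are below) =====
def Claim_equal_find_grade_list : Prop := ∀ (students_list : List String), Dom_find_grade_list students_list → Pre_find_grade_list students_list → Spec_find_grade_list students_list (find_grade_list students_list)

-- ===== LEMMAS AND PROOFS =====

-- the "last matching index" characterisation shared by both ports
def pvM (full : List String) (lbl : String) (idxs : List Int) : Option String :=
  (idxs.find? (fun i => PySem.Str.strip (PySem.List.pyGetD full i "") == lbl)).map
    (fun i => PySem.List.pyGetD full (i + 1) "")

def pvMP (full : List String) (lbl : String) (ps : List (Int × String)) : Option String :=
  (ps.reverse.find? (fun p => PySem.Str.strip p.2 == lbl)).map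
    (fun p => PySem.List.pyGetD full (p.1 + 1) "")

theorem pvGradeB_eq (full : List String) (lbl : String) :
    ∀ idxs : List Int, pvGradeB full lbl idxs = pvIntOfA (pvM full lbl idxs) := by
  intro idxs
  induction idxs with
  | nil => simp [pvGradeB, pvM, pvIntOfA]
  | cons i rest ih =>
    by_cases h : (PySem.Str.strip (PySem.List.pyGetD full i "") == lbl) = true
    · simp [pvGradeB, pvM, List.find?_cons, h, pvIntOfA]
    · simp only [Bool.not_eq_true] at h
      simp [pvGradeB, pvM, h, pvIntOfA] at ih ⊢
      exact ih

theorem pvMP_cons (full : List String) (lbl : String) (p : Int × String)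
    (ps : List (Int × String)) (t : Option String) :
    Option.or (pvMP full lbl ps)
      (if PySem.Str.strip p.2 == lbl then some (PySem.List.pyGetD full (p.1 + 1) "") else t)
    = Option.or (pvMP full lbl (p :: ps)) t := by
  unfold pvMP
  rw [List.reverse_cons, List.find?_append, Option.map_or, Option.or_assoc]
  by_cases h : (PySem.Str.strip p.2 == lbl) = true
  · simp [List.find?_cons, h]
  · simp only [Bool.not_eq_true] at h
    simp [h]

theorem pvFoldA_eq (full : List String) :
    ∀ (ps : List (Int × String)) (s : Option String × Option String × Option String × Option String),
      ps.foldl (pvStepA full) s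
        = (Option.or (pvMP full "Test_1" ps) s.1,
           Option.or (pvMP full "Test_2" ps) s.2.1,
           Option.or (pvMP full "Test_3" ps) s.2.2.1,
           Option.or (pvMP full "Test_4" ps) s.2.2.2) := by
  intro ps
  induction ps with
  | nil => intro s; simp [pvMP]
  | cons p ps ih =>
    intro s
    rw [List.foldl_cons, ih]
    show (_, _, _, _) = (_, _, _, _)
    refine congrArg₂ Prod.mk ?_ (congrArg₂ Prod.mk ?_ (congrArg₂ Prod.mk ?_ ?_)) <;>
      exact pvMP_cons full _ p ps _

theorem pvMP_enumerate (full : List String) (lbl : String) :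
    pvMP full lbl (PySem.List.enumerate full)
      = pvM full lbl ((PySem.List.pyRange 0 (PySem.List.len full)).reverse) := by
  rw [PySem.List.enumerate_eq_map_pyRange full ""]
  unfold pvMP pvM
  rw [← List.map_reverse, List.find?_map, Option.map_map]
  rfl

-- ===== VERDICT (by name: the statement is the Claim_ definition above) =====
theorem find_grade_list_spec : Claim_equal_find_grade_list := by
  intro l _ _
  show find_grade_list l = find_grade_list_alt l
  unfold find_grade_list find_grade_list_alt
  rw [pvFoldA_eq]
  simp only [pvMP_enumerate, Option.or_none]
  rw [pvGradeB_eq, pvGradeB_eq, pvGradeB_eq, pvGradeB_eq]
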